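-- pv_equiv track=rewrite | github.com/WolfgangFahl/play-chess-with-a-webcam | pcwawc/mathUtils.py | getIndexRange
-- ===== SOURCE A (Python) =====
-- def getIndexRange(hist, minValue, maxValue):
--     """ # get the range of the histogramm where the value are between minValue and maxValue"""
--     fromIndex = -1
--     toIndex = len(hist)
--     for index, value in enumerate(hist):
--         if value >= minValue and fromIndex < 0:
--             fromIndex = index
--         if value >= minValue and value <= maxValue and index < len(hist):
--             toIndex = index
--     return (fromIndex, toIndex)
-- ===== SOURCE B (Python) =====
-- def getIndexRange(hist, minValue, maxValue):
--     fromIndex = next((i for i, v in enumerate(hist) if v >= minValue), -1)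
--     toIndex = next((i for i, v in reversed(list(enumerate(hist)))
--                     if minValue <= v <= maxValue), len(hist))
--     return (fromIndex, toIndex)
-- ===== Notes on version B (the rewrite author's own statement) =====
-- stated objective: idiomatic
-- what changed: Replaces the single fused loop tracking two accumulators with two independent early-exit searches: a forward next() for the first index with value>=minValue and a backward scan over reversed(enumerate) for the last index in [minValue,maxValue].
import Mathlib
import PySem

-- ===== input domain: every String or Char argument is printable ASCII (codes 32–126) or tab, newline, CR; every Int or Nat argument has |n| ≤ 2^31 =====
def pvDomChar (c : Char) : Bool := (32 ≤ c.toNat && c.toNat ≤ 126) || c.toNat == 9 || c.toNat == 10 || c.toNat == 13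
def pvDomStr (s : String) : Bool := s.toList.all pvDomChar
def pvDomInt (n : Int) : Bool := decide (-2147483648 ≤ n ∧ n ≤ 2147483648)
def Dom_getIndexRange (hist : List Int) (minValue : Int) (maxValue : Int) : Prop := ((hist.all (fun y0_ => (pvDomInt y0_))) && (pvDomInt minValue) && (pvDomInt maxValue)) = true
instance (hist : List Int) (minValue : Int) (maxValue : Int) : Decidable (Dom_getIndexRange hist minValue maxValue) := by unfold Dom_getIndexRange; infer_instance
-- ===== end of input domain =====

-- B replaces A's single fused loop with two independent directional searches (forward first-match, backward last-match); idiomatic decomposition, same O(n) cost.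


-- ===== PORT A =====
-- loop body of A: updates (fromIndex, toIndex) for one (index, value) pair; n = len(hist)
def stepA (minValue maxValue n : Int) (st : Int × Int) (p : Int × Int) : Int × Int :=
  let fromIndex := if p.2 ≥ minValue ∧ st.1 < 0 then p.1 else st.1
  let toIndex := if p.2 ≥ minValue ∧ p.2 ≤ maxValue ∧ p.1 < n then p.1 else st.2
  (fromIndex, toIndex)

def getIndexRange (hist : List Int) (minValue : Int) (maxValue : Int) : Int × Int :=
  (PySem.List.enumerate hist 0).foldl (stepA minValue maxValue (hist.length : Int))
    (-1, (hist.length : Int))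

-- ===== PORT B =====
-- forward early-exit search: first index (counting from i) with minValue ≤ v, else -1
def findFirstGE (hist : List Int) (minValue : Int) (i : Int) : Int :=
  match hist with
  | [] => -1
  | v :: rest => if v ≥ minValue then i else findFirstGE rest minValue (i + 1)

-- backward search: first pair (i, v) in the given (reversed) enumeration with minValue ≤ v ≤ maxValue, else dflt
def findLastIn (pairs : List (Int × Int)) (minValue maxValue dflt : Int) : Int :=
  match pairs with
  | [] => dflt
  | (i, v) :: rest => if minValue ≤ v ∧ v ≤ maxValue then i else findLastIn rest minValue maxValue dflt

def getIndexRange_alt (hist : List Int) (minValue : Int) (maxValue : Int) : Int × Int :=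
  (findFirstGE hist minValue 0,
   findLastIn (PySem.List.enumerate hist 0).reverse minValue maxValue (hist.length : Int))

-- ===== PRECONDITION & SPEC =====
def Spec_getIndexRange (hist : List Int) (minValue : Int) (maxValue : Int) (out : Int × Int) : Prop := out = getIndexRange_alt hist minValue maxValue
instance (hist : List Int) (minValue : Int) (maxValue : Int) (out : Int × Int) : Decidable (Spec_getIndexRange hist minValue maxValue out) := by unfold Spec_getIndexRange; infer_instance

-- ===== CLAIM (what is proved, stated in full; the proofs are below) =====
def Claim_equal_getIndexRange : Prop := ∀ (hist : List Int) (minValue : Int) (maxValue : Int), Dom_getIndexRange hist minValue maxValue → Spec_getIndexRange hist minValue maxValue (getIndexRange hist minValue maxValue)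

-- ===== LEMMAS AND PROOFS =====

lemma findLastIn_append (xs ys : List (Int × Int)) (minValue maxValue dflt : Int) :
    findLastIn (xs ++ ys) minValue maxValue dflt
      = findLastIn xs minValue maxValue (findLastIn ys minValue maxValue dflt) := by
  induction xs with
  | nil => simp [findLastIn]
  | cons p rest ih =>
    obtain ⟨i, v⟩ := p
    simp only [List.cons_append, findLastIn]
    split_ifs <;> simp [ih]

lemma foldl_stepA_eq (minValue maxValue n : Int) :
    ∀ (hist : List Int) (s f0 t0 : Int), 0 ≤ s → s + (hist.length : Int) ≤ n →
      (f0 < 0 → f0 = -1) →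
      (PySem.List.enumerate hist s).foldl (stepA minValue maxValue n) (f0, t0)
        = ((if f0 < 0 then findFirstGE hist minValue s else f0),
           findLastIn (PySem.List.enumerate hist s).reverse minValue maxValue t0) := by
  intro hist
  induction hist with
  | nil =>
    intro s f0 t0 _ _ hf
    simp only [PySem.List.enumerate_nil, List.foldl_nil, List.reverse_nil, findLastIn]
    by_cases h : f0 < 0
    · simp [hf h, findFirstGE]
    · simp [h]
  | cons v rest ih =>
    intro s f0 t0 hs hn hf
    have hsn : s < n := by simp at hn; omega
    rw [PySem.List.enumerate_cons, List.foldl_cons, List.reverse_cons, findLastIn_append]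
    have hrest : s + 1 + (rest.length : Int) ≤ n := by simp at hn ⊢; omega
    by_cases hm : v ≥ minValue
    · have hlast : findLastIn [(s, v)] minValue maxValue t0
          = if minValue ≤ v ∧ v ≤ maxValue ∧ s < n then s else t0 := by
        simp only [findLastIn]
        by_cases hx : minValue ≤ v ∧ v ≤ maxValue
        · simp [hx, hsn]
        · have h3 : ¬ (minValue ≤ v ∧ v ≤ maxValue ∧ s < n) := by tauto
          simp [hx, h3]
      rw [hlast]
      by_cases hneg : f0 < 0
      · -- fromIndex becomes s (nonnegative from now on)
        rw [show stepA minValue maxValue n (f0, t0) (s, v)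
              = (s, if minValue ≤ v ∧ v ≤ maxValue ∧ s < n then s else t0) by
            simp [stepA, hm, hneg]]
        rw [ih (s + 1) s _ (by omega) hrest (by omega)]
        have hnn : ¬ s < 0 := by omega
        simp [hnn, hneg, findFirstGE, hm]
      · rw [show stepA minValue maxValue n (f0, t0) (s, v)
              = (f0, if minValue ≤ v ∧ v ≤ maxValue ∧ s < n then s else t0) by
            simp [stepA, hm, hneg]]
        rw [ih (s + 1) f0 _ (by omega) hrest hf]
        simp [hneg]
    · -- value below minValue: both accumulators unchanged for this element
      have h3 : ¬ (minValue ≤ v ∧ v ≤ maxValue) := fun h => hm h.1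
      rw [show findLastIn [(s, v)] minValue maxValue t0 = t0 by simp [findLastIn, h3]]
      rw [show stepA minValue maxValue n (f0, t0) (s, v) = (f0, t0) by
            simp [stepA, hm]]
      rw [ih (s + 1) f0 t0 (by omega) hrest hf]
      simp [findFirstGE, hm]

-- ===== VERDICT (by name: the statement is the Claim_ definition above) =====
theorem getIndexRange_spec : Claim_equal_getIndexRange := by
  intro hist minValue maxValue _
  unfold Spec_getIndexRange getIndexRange getIndexRange_alt
  rw [foldl_stepA_eq minValue maxValue (hist.length : Int) hist 0 (-1) (hist.length : Int)
      le_rfl (by omega) (fun _ => rfl)]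
  simp
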